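-- pv_equiv track=rewrite | github.com/fa7271/Python-Algorithm | bs/Programmers/Level3/보석 쇼핑.py | solution
-- ===== SOURCE A (Python) =====
-- from collections import Counter
--
-- def solution(gems):
--     res = []
--     left, right = 0, 0
--     dia_len = len(set(gems))
--     gem_counts = Counter()  # 각 보석의 등장 횟수를 세는 Counter 객체
--
--     while right < len(gems):
--         gem_counts[gems[right]] += 1  # 보석 등장 횟수를 갱신
--         if len(gem_counts) == dia_len:  # 모든 보석 종류가 포함된 경우
--             while gem_counts[gems[left]] > 1:  # 최소 범위를 찾기 위해 left를 옮기면서 중복 보석을 제거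
--                 gem_counts[gems[left]] -= 1
--                 left += 1
--             res.append([left+1,right+1])
--
--         right += 1
--     res.sort(key=lambda x:(x[1]-x[0],x[0]))  # 최소 범위 기준으로 정렬
--     return res[0]
-- ===== SOURCE B (Python) =====
-- def solution(gems):
--     # Last-occurrence approach: after each position, the tightest window ending
--     # there starts at the minimum of the last occurrence indices of all types.
--     need = len(set(gems))
--     last = {}
--     best = None
--     for right, g in enumerate(gems):
--         last[g] = right
--         if len(last) == need:
--             left = min(last.values())
--             key = (right - left, left)
--             if best is None or key < best:
--                 best = key
--     return [best[1] + 1, best[0] + best[1] + 1]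
-- ===== Notes on version B (the rewrite author's own statement) =====
-- stated objective: alternative
-- what changed: A maintains a count-per-gem sliding window that shrinks the left pointer while head counts exceed 1, collects every qualifying window and sorts them; B instead keeps only a last-occurrence-index dictionary, derives the tightest window ending at each position directly as min(last.values()), and keeps a running (length,left) minimum - no counts, no shrinking pointer, no final sort.
-- outside the precondition, e.g. on solution([]): A raises IndexError, B raises TypeError
import Mathlib
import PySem

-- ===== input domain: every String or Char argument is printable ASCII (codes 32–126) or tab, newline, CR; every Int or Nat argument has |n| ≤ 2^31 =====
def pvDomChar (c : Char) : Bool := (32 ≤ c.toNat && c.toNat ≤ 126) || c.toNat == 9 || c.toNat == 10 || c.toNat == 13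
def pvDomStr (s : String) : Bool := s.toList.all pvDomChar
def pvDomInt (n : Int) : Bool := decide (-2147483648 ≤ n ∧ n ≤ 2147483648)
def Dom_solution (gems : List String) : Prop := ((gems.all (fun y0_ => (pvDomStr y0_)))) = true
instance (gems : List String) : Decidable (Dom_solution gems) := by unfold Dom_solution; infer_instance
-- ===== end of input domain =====

-- B replaces A's count-and-shrink sliding window + final sort by a last-occurrence dictionary: the tightest window ending at each position starts at min(last occurrence of every type); a running minimum picks the answer (alternative algorithm, same result; return value only).


-- ===== PORT A =====
-- inner while: move left while counts[gems[left]] > 1 (fuel = gems.length, always sufficient; guard for totality only)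
def shrinkA (gems : List String) : Nat → Int → PySem.Dict String Int → Int × PySem.Dict String Int
  | 0, left, counts => (left, counts)
  | fuel + 1, left, counts =>
    if counts.getD (PySem.List.pyGetD gems left "") 0 > 1 then
      shrinkA gems fuel (left + 1) (counts.modify (PySem.List.pyGetD gems left "") 0 (· - 1))
    else (left, counts)

-- outer while over right = 0,1,…: the remaining suffix of gems is traversed, right is the index of its head
def loopA (gems : List String) (diaLen : Nat) :
    List String → Int → Int → PySem.Dict String Int → List (List Int) → List (List Int)
  | [], _, _, _, res => res
  | g :: rest, right, left, counts, res =>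
    let counts' := counts.modify g 0 (· + 1)
    if counts'.size = diaLen then
      let p := shrinkA gems gems.length left counts'
      loopA gems diaLen rest (right + 1) p.1 p.2 (res ++ [[p.1 + 1, right + 1]])
    else
      loopA gems diaLen rest (right + 1) left counts' res

def solution (gems : List String) : List Int :=
  let res := loopA gems (PySem.Set.ofList gems).length gems 0 0 PySem.Dict.empty []
  -- res.sort(key=lambda x:(x[1]-x[0],x[0])); return res[0] — res[0] raises IndexError iff res = [] (iff gems = []), excluded by Pre_
  PySem.List.pyGetD (PySem.List.sorted2 res
    (fun x => PySem.List.pyGetD x 1 0 - PySem.List.pyGetD x 0 0)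
    (fun x => PySem.List.pyGetD x 0 0)) 0 []

-- ===== PORT B =====
-- loop body of 'for right, g in enumerate(gems)': state (last, best); best = (length, left) key
def stepB (need : Nat) (st : PySem.Dict String Int × Option (Int × Int)) (p : Int × String) :
    PySem.Dict String Int × Option (Int × Int) :=
  let last := st.1.insert p.2 p.1
  if last.size = need then
    -- min(last.values()): last is nonempty whenever this branch is taken, so min? is 'some'
    let left := (PySem.List.min? last.values (fun x => x)).getD 0
    let key := (p.1 - left, left)
    let best :=
      match st.2 with
      | none => some key
      | some b =>  -- Python tuple '<': lexicographic
        if key.1 < b.1 ∨ (key.1 = b.1 ∧ key.2 < b.2) then some key else some b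
    (last, best)
  else (last, st.2)

def solution_alt (gems : List String) : List Int :=
  let need := (PySem.Set.ofList gems).length
  let r := (PySem.List.enumerate gems).foldl (stepB need) (PySem.Dict.empty, none)
  -- Source B returns [best[1]+1, best[0]+best[1]+1]; best is None only for gems = [] (outside Pre_, Python raises): [] stands in
  match r.2 with
  | some b => [b.2 + 1, b.1 + b.2 + 1]
  | none => []

-- ===== PRECONDITION & SPEC =====
-- Pre_ excludes only gems = [], on which A raises IndexError (res[0] of an empty list) and Source B raises TypeError (best is None).
def Pre_solution (gems : List String) : Prop := gems ≠ []
instance (gems : List String) : Decidable (Pre_solution gems) := by unfold Pre_solution; infer_instance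
def pvWitness_solution : List String := (["a", "b", "a"])

def Spec_solution (gems : List String) (out : List Int) : Prop := out = solution_alt gems
instance (gems : List String) (out : List Int) : Decidable (Spec_solution gems out) := by unfold Spec_solution; infer_instance

-- ===== CLAIM (what is proved, stated in full; the proofs are below) =====
def Claim_equal_solution : Prop := ∀ (gems : List String), Dom_solution gems → Pre_solution gems → Spec_solution gems (solution gems)

-- ===== LEMMAS AND PROOFS =====

-- index of the LAST occurrence of g in P (meaningful when g ∈ P)
def lastOcc : List String → String → Nat
  | [], _ => 0
  | _ :: t, g => if g ∈ t then lastOcc t g + 1 else 0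

lemma lastOcc_append (P : List String) (x g : String) (hg : g ∈ P ∨ g = x) :
    lastOcc (P ++ [x]) g = if g = x then P.length else lastOcc P g := by
  induction P with
  | nil =>
    rcases hg with h | h
    · cases h
    · subst h; simp [lastOcc]
  | cons p t ih =>
    by_cases hx : g = x
    · subst hx
      simp only [List.cons_append, lastOcc]
      have : g ∈ t ++ [g] := by simp
      rw [if_pos this, ih (Or.inr rfl), if_pos rfl]
      simp
    · have hgP : g ∈ p :: t := by tauto
      simp only [List.cons_append, lastOcc, if_neg hx]
      by_cases ht : g ∈ t
      · have : g ∈ t ++ [x] := by simp [ht]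
        rw [if_pos this, ih (Or.inl ht), if_neg hx, if_pos ht]
      · have : ¬ g ∈ t ++ [x] := by simp [ht, hx]
        rw [if_neg this, if_neg ht]

lemma lastOcc_lt_length (P : List String) (g : String) (h : g ∈ P) : lastOcc P g < P.length := by
  induction P with
  | nil => cases h
  | cons p t ih =>
    simp only [lastOcc]
    by_cases ht : g ∈ t
    · rw [if_pos ht]; simpa using ih ht
    · rw [if_neg ht]; simp

lemma getElem?_lastOcc (P : List String) (g : String) (h : g ∈ P) :
    P[lastOcc P g]? = some g := by
  induction P with
  | nil => cases h
  | cons p t ih =>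
    simp only [lastOcc]
    by_cases ht : g ∈ t
    · rw [if_pos ht]; simpa using ih ht
    · rw [if_neg ht]
      have : g = p := by rcases List.mem_cons.mp h with h' | h' <;> tauto
      simp [this]

lemma lastOcc_max (P : List String) (g : String) (j : Nat) (hj : lastOcc P g < j) :
    P[j]? ≠ some g := by
  induction P generalizing j with
  | nil => simp
  | cons p t ih =>
    simp only [lastOcc] at hj
    by_cases ht : g ∈ t
    · rw [if_pos ht] at hj
      obtain ⟨k, rfl⟩ : ∃ k, j = k + 1 := ⟨j - 1, by omega⟩
      simpa using ih (k) (by omega)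
    · rw [if_neg ht] at hj
      obtain ⟨k, rfl⟩ : ∃ k, j = k + 1 := ⟨j - 1, by omega⟩
      simp only [List.getElem?_cons_succ]
      intro hc
      exact ht (List.mem_of_getElem? hc)

-- window-count facts
lemma count_drop_pos (P : List String) (g : String) (L : Nat) (hg : g ∈ P)
    (hL : L ≤ lastOcc P g) : 0 < (P.drop L).count g := by
  rw [List.count_pos_iff]
  have hocc := getElem?_lastOcc P g hg
  have : (P.drop L)[lastOcc P g - L]? = some g := by
    rw [List.getElem?_drop]
    have : L + (lastOcc P g - L) = lastOcc P g := by omega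
    rw [this]; exact hocc
  exact List.mem_of_getElem? this

lemma drop_eq_cons (P : List String) (L : Nat) (g : String) (h : P[L]? = some g) :
    P.drop L = g :: P.drop (L + 1) := by
  have hlt : L < P.length := (List.getElem?_eq_some_iff.mp h).1
  rw [List.drop_eq_getElem_cons hlt]
  have : P[L] = g := by
    have := List.getElem?_eq_getElem hlt (l := P)
    rw [h] at this; exact (Option.some.injEq _ _).mp this.symm
  rw [this]

lemma count_drop_eq_one (P : List String) (g : String) (L : Nat)
    (h : P[L]? = some g) (hlast : lastOcc P g = L) : (P.drop L).count g = 1 := by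
  rw [drop_eq_cons P L g h]
  have hz : (P.drop (L + 1)).count g = 0 := by
    rw [List.count_eq_zero]
    intro hmem
    obtain ⟨i, hi, hv⟩ := List.getElem_of_mem hmem
    have : P[L + 1 + i]? = some g := by
      rw [← List.getElem?_drop]
      exact (List.getElem?_eq_getElem hi).trans (by rw [hv])
    exact lastOcc_max P g (L + 1 + i) (by omega) this
  simp [hz]

lemma count_drop_gt_one (P : List String) (g : String) (L : Nat)
    (h : P[L]? = some g) (hlast : L < lastOcc P g) (hg : g ∈ P) : 1 < (P.drop L).count g := by
  rw [drop_eq_cons P L g h]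
  have : 0 < (P.drop (L + 1)).count g := count_drop_pos P g (L + 1) hg (by omega)
  rw [List.count_cons_self]; omega

-- the shrink loop lands exactly on m = min over all types of the last-occurrence index
lemma shrink_spec (P rest : List String) (m : Nat) (g0 : String)
    (hocc : P[m]? = some g0) (hg0 : lastOcc P g0 = m)
    (hmin : ∀ g ∈ P, m ≤ lastOcc P g) :
    ∀ (fuel L : Nat) (counts : PySem.Dict String Int),
    (∀ g, counts.getD g 0 = ((P.drop L).count g : Int)) →
    (∀ g, g ∈ counts.keys ↔ g ∈ P) →
    L ≤ m → m - L < fuel →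
    (shrinkA (P ++ rest) fuel (L : Int) counts).1 = (m : Int) ∧
    (∀ g, (shrinkA (P ++ rest) fuel (L : Int) counts).2.getD g 0 = ((P.drop m).count g : Int)) ∧
    (shrinkA (P ++ rest) fuel (L : Int) counts).2.keys = counts.keys := by
  intro fuel
  induction fuel with
  | zero => intro L counts _ _ _ hf; omega
  | succ k ih =>
    intro L counts hd hk hLm hf
    have hmlt : m < P.length := (List.getElem?_eq_some_iff.mp hocc).1
    have hLlt : L < P.length := by omega
    have hx : P[L]? = some (P[L]'hLlt) := List.getElem?_eq_getElem hLlt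
    have hgetl : PySem.List.pyGetD (P ++ rest) (L : Int) "" = P[L]'hLlt := by
      rw [PySem.List.pyGetD_natCast]
      simp [List.getD, List.getElem?_append_left hLlt, hx]
    by_cases hLem : L = m
    · subst hLem
      have hxg : P[L]'hLlt = g0 := by
        have := hocc; rw [hx] at this; exact (Option.some.injEq _ _).mp this
      refine ⟨?_, ?_, ?_⟩
      · simp only [shrinkA, hgetl, hxg, hd g0, count_drop_eq_one P g0 L hocc hg0]
        norm_num
      · intro g
        simp only [shrinkA, hgetl, hxg, hd g0, count_drop_eq_one P g0 L hocc hg0]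
        norm_num
        exact hd g
      · simp only [shrinkA, hgetl, hxg, hd g0, count_drop_eq_one P g0 L hocc hg0]
        norm_num
    · -- L < m: the head occurs again later, count > 1, step
      have hLm' : L < m := by omega
      have hmem : (P[L]'hLlt) ∈ P := List.getElem_mem hLlt
      have hlater : L < lastOcc P (P[L]'hLlt) := by
        have := hmin _ hmem; omega
      have hcnt : 1 < (P.drop L).count (P[L]'hLlt) :=
        count_drop_gt_one P _ L hx hlater hmem
      have hguard : counts.getD (P[L]'hLlt) 0 > 1 := by
        rw [hd]; exact_mod_cast hcnt
      simp only [shrinkA, hgetl, if_pos hguard]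
      have hcast : (L : Int) + 1 = ((L + 1 : Nat) : Int) := by push_cast; ring
      rw [hcast]
      have hkeys' : (counts.modify (P[L]'hLlt) 0 (· - 1)).keys = counts.keys := by
        rw [PySem.Dict.keys_modify,
          PySem.Dict.keys_insert_of_contains _ _
            ((PySem.Dict.contains_iff_mem_keys _ _).mpr ((hk _).mpr hmem))]
      have hrec := ih (L + 1) (counts.modify (P[L]'hLlt) 0 (· - 1)) ?_ ?_ (by omega) (by omega)
      · exact ⟨hrec.1, hrec.2.1, hrec.2.2.trans hkeys'⟩
      · intro g
        rw [PySem.Dict.getD_modify]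
        have hdrop : P.drop L = (P[L]'hLlt) :: P.drop (L + 1) := drop_eq_cons P L _ hx
        by_cases hgx : g = P[L]'hLlt
        · rw [if_pos hgx, hd, hdrop, hgx, List.count_cons_self]
          push_cast; ring
        · rw [if_neg hgx, hd, hdrop]
          simp only [List.count_cons, beq_iff_eq]
          rw [if_neg (fun h => hgx h.symm), add_zero]
      · intro g; rw [hkeys']; exact hk g

-- A-side best-candidate fold (first minimum of the sorted list)
def bstepA (b? : Option (List Int)) (x : List Int) : Option (List Int) :=
  match b? with
  | none => some x
  | some b =>
    if PySem.List.pyGetD x 1 0 - PySem.List.pyGetD x 0 0 <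
         PySem.List.pyGetD b 1 0 - PySem.List.pyGetD b 0 0 ∨
       (PySem.List.pyGetD x 1 0 - PySem.List.pyGetD x 0 0 =
          PySem.List.pyGetD b 1 0 - PySem.List.pyGetD b 0 0 ∧
        PySem.List.pyGetD x 0 0 < PySem.List.pyGetD b 0 0)
    then some x else some b

-- stable insertion sort head = running first-minimum under the same lexicographic key
lemma head_foldl_insertBy (xs : List (List Int)) :
    ∀ (acc : List (List Int)),
    (xs.foldl (fun a x => PySem.List.insertBy
        (fun a b =>
          decide (PySem.List.pyGetD a 1 0 - PySem.List.pyGetD a 0 0 <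
                  PySem.List.pyGetD b 1 0 - PySem.List.pyGetD b 0 0) ||
          (!decide (PySem.List.pyGetD b 1 0 - PySem.List.pyGetD b 0 0 <
                    PySem.List.pyGetD a 1 0 - PySem.List.pyGetD a 0 0) &&
           decide (PySem.List.pyGetD a 0 0 < PySem.List.pyGetD b 0 0))) x a) acc).head?
      = xs.foldl bstepA acc.head? := by
  induction xs with
  | nil => intro acc; rfl
  | cons x t ih =>
    intro acc
    simp only [List.foldl_cons]
    rw [ih]
    congr 1
    cases acc with
    | nil => rfl
    | cons y ys =>
      simp only [PySem.List.insertBy, List.head?_cons, bstepA]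
      split_ifs with h1 h2 h2 <;> simp_all <;> omega

-- key (length, left) ↦ the pair A stores: [left+1, right+1]
def keyToPair (k : Int × Int) : List Int := [k.2 + 1, k.1 + k.2 + 1]

-- B's best-update step on (length, left) keys
def bupd (b? : Option (Int × Int)) (k : Int × Int) : Option (Int × Int) :=
  match b? with
  | none => some k
  | some b => if k.1 < b.1 ∨ (k.1 = b.1 ∧ k.2 < b.2) then some k else some b

lemma bstepA_keyToPair (b? : Option (Int × Int)) (k : Int × Int) :
    bstepA (b?.map keyToPair) (keyToPair k) = (bupd b? k).map keyToPair := by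
  cases b? with
  | none => rfl
  | some b =>
    have e1 : ∀ u v : Int, PySem.List.pyGetD [u, v] 0 0 = u := fun u v => rfl
    have e2 : ∀ u v : Int, PySem.List.pyGetD [u, v] 1 0 = v := fun u v => rfl
    simp only [Option.map_some, bstepA, bupd, keyToPair, e1, e2]
    have hiff : (k.1 + k.2 + 1 - (k.2 + 1) < b.1 + b.2 + 1 - (b.2 + 1) ∨
        (k.1 + k.2 + 1 - (k.2 + 1) = b.1 + b.2 + 1 - (b.2 + 1) ∧ k.2 + 1 < b.2 + 1))
        ↔ (k.1 < b.1 ∨ (k.1 = b.1 ∧ k.2 < b.2)) := by omega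
    rw [if_congr hiff rfl rfl]
    split_ifs <;> rfl

-- loop invariant tying A's window state (left pointer + window counter) to B's last-occurrence dict
def WInv (P : List String) (L : Nat) (counts last : PySem.Dict String Int) : Prop :=
  counts.keys = last.keys ∧
  counts.keys.Nodup ∧
  (∀ g, g ∈ counts.keys ↔ g ∈ P) ∧
  (L ≤ P.length ∧ ∀ g ∈ P, L ≤ lastOcc P g) ∧
  (∀ g, counts.getD g 0 = ((P.drop L).count g : Int)) ∧
  (∀ g ∈ P, last.getD g 0 = (lastOcc P g : Int))

lemma WInv_step (P : List String) (L : Nat) (counts last : PySem.Dict String Int)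
    (x : String) (h : WInv P L counts last) :
    WInv (P ++ [x]) L (counts.modify x 0 (· + 1)) (last.insert x (P.length : Int)) := by
  obtain ⟨h1, h2, h3, ⟨h4a, h4b⟩, h5, h6⟩ := h
  have hkc : (counts.modify x 0 (· + 1)).keys = if counts.contains x then counts.keys else counts.keys ++ [x] := by
    rw [PySem.Dict.keys_modify]
    by_cases hc : counts.contains x
    · rw [PySem.Dict.keys_insert_of_contains _ _ hc, if_pos hc]
    · rw [PySem.Dict.keys_insert_of_not_contains _ _ (by simpa using hc), if_neg hc]
  have hkl : (last.insert x (P.length : Int)).keys = if last.contains x then last.keys else last.keys ++ [x] := by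
    by_cases hc : last.contains x
    · rw [PySem.Dict.keys_insert_of_contains _ _ hc, if_pos hc]
    · rw [PySem.Dict.keys_insert_of_not_contains _ _ (by simpa using hc), if_neg hc]
  have hcc : counts.contains x = last.contains x := by
    rw [Bool.eq_iff_iff, PySem.Dict.contains_iff_mem_keys, PySem.Dict.contains_iff_mem_keys, h1]
  refine ⟨?_, ?_, ?_, ⟨by simp; omega, ?_⟩, ?_, ?_⟩
  · rw [hkc, hkl, hcc, h1]
  · rw [hkc]
    split_ifs with hc
    · exact h2
    · have hxnot : x ∉ counts.keys := fun hm => hc ((PySem.Dict.contains_iff_mem_keys _ _).mpr hm)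
      exact List.Nodup.append h2 (List.nodup_singleton x)
        (by simpa [List.disjoint_singleton] using hxnot)
  · intro g
    rw [hkc]
    split_ifs with hc
    · have hxk : x ∈ counts.keys := (PySem.Dict.contains_iff_mem_keys _ _).mp hc
      constructor
      · intro hg; simp [List.mem_append, (h3 g).mp hg]
      · intro hg
        rcases List.mem_append.mp hg with hg | hg
        · exact (h3 g).mpr hg
        · simp only [List.mem_singleton] at hg; subst hg; exact hxk
    · simp only [List.mem_append, List.mem_singleton, h3]
  · intro g hg
    rcases List.mem_append.mp hg with hg | hg
    · rw [lastOcc_append P x g (Or.inl hg)]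
      split_ifs with he
      · omega
      · exact h4b g hg
    · simp only [List.mem_singleton] at hg; subst hg
      rw [lastOcc_append P g g (Or.inr rfl), if_pos rfl]; omega
  · intro g
    rw [PySem.Dict.getD_modify, List.drop_append_of_le_length h4a]
    by_cases hgx : g = x
    · subst hgx
      rw [if_pos rfl, h5]
      simp [List.count_append]
    · rw [if_neg hgx, h5]
      have : x ≠ g := fun h => hgx h.symm
      simp [List.count_append, this]
  · intro g hg
    rw [PySem.Dict.getD_insert]
    rcases List.mem_append.mp hg with hg' | hg'
    · rw [lastOcc_append P x g (Or.inl hg')]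
      by_cases hgx : g = x
      · rw [if_pos hgx, if_pos hgx]
      · rw [if_neg hgx, if_neg hgx]; exact h6 g hg'
    · simp only [List.mem_singleton] at hg'; subst hg'
      rw [if_pos rfl, lastOcc_append P g g (Or.inr rfl), if_pos rfl]

-- main loop correspondence: B's running best (mapped through keyToPair) = fold of A's candidate list
lemma loop_inv (gems : List String) (need : Nat) :
    ∀ (rest P : List String) (L : Nat) (counts last : PySem.Dict String Int)
      (res : List (List Int)) (best : Option (Int × Int)),
    gems = P ++ rest →
    WInv P L counts last →
    res.foldl bstepA none = best.map keyToPair →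
    (loopA gems need rest (P.length : Int) (L : Int) counts res).foldl bstepA none
      = (((PySem.List.enumerate rest (P.length : Int)).foldl (stepB need) (last, best)).2).map keyToPair := by
  intro rest
  induction rest with
  | nil =>
    intro P L counts last res best hg hI hres
    simpa [loopA, PySem.List.enumerate_nil] using hres
  | cons g rest' ih =>
    intro P L counts last res best hg hI hres
    obtain ⟨h1', h2', h3', ⟨h4a', h4b'⟩, h5', h6'⟩ := WInv_step P L counts last g hI
    have hgem' : gems = (P ++ [g]) ++ rest' := by rw [hg, List.append_assoc]; rfl
    have hsz : (counts.modify g 0 (· + 1)).size = (last.insert g (P.length : Int)).size := by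
      have := congrArg List.length h1'
      simpa [PySem.Dict.keys, PySem.Dict.size] using this
    have hlen' : (P.length : Int) + 1 = (((P ++ [g]).length : Nat) : Int) := by
      push_cast [List.length_append, List.length_singleton]; ring
    rw [PySem.List.enumerate_cons]
    simp only [loopA, List.foldl_cons]
    by_cases hcond : (counts.modify g 0 (· + 1)).size = need
    · rw [if_pos hcond]
      have hcondB : (last.insert g ((P.length : Int))).size = need := by rw [← hsz]; exact hcond
      have hgmem : g ∈ P ++ [g] := by simp
      have hnodl : (last.insert g ((P.length : Int))).keys.Nodup := h1' ▸ h2'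
      have hgkeys : g ∈ (last.insert g ((P.length : Int))).keys := h1' ▸ ((h3' g).mpr hgmem)
      have hvals : (last.insert g ((P.length : Int))).values
          = (last.insert g ((P.length : Int))).keys.map
              (fun k => (last.insert g ((P.length : Int))).getD k 0) :=
        PySem.Dict.values_eq_map_keys _ hnodl 0
      obtain ⟨v, hv⟩ : ∃ v, PySem.List.min? (last.insert g ((P.length : Int))).values (fun x => x) = some v := by
        cases hmv : PySem.List.min? (last.insert g ((P.length : Int))).values (fun x => x) with
        | none =>
          exfalso
          have hnil := (PySem.List.min?_eq_none_iff _ _).mp hmv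
          rw [hvals] at hnil
          rw [List.map_eq_nil_iff.mp hnil] at hgkeys
          cases hgkeys
        | some v => exact ⟨v, rfl⟩
      have hvmem := PySem.List.min?_mem hv
      rw [hvals] at hvmem
      obtain ⟨g0, hg0k, hg0v⟩ := List.mem_map.mp hvmem
      have hg0P : g0 ∈ P ++ [g] := (h3' g0).mp (h1' ▸ hg0k)
      have hveq : v = ((lastOcc (P ++ [g]) g0 : Nat) : Int) := by
        rw [← hg0v, h6' g0 hg0P]
      have hminP : ∀ g' ∈ P ++ [g], lastOcc (P ++ [g]) g0 ≤ lastOcc (P ++ [g]) g' := by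
        intro g' hg'
        have hk' : g' ∈ (last.insert g ((P.length : Int))).keys := h1' ▸ ((h3' g').mpr hg')
        have hmem' : (last.insert g ((P.length : Int))).getD g' 0
            ∈ (last.insert g ((P.length : Int))).values := by
          rw [hvals]; exact List.mem_map_of_mem hk'
        have hle := PySem.List.min?_isMin hv _ hmem'
        rw [hveq, h6' g' hg'] at hle
        exact_mod_cast hle
      have hLmN : L ≤ lastOcc (P ++ [g]) g0 := h4b' g0 hg0P
      have hocc := getElem?_lastOcc (P ++ [g]) g0 hg0P
      have hmlt : lastOcc (P ++ [g]) g0 < (P ++ [g]).length := lastOcc_lt_length _ g0 hg0P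
      have hglen : (P ++ [g]).length ≤ gems.length := by
        rw [hgem']; simp
      have hsh := shrink_spec (P ++ [g]) rest' (lastOcc (P ++ [g]) g0) g0 hocc rfl hminP
        gems.length L (counts.modify g 0 (· + 1)) h5' h3' hLmN (by omega)
      rw [← hgem'] at hsh
      have hstepB : stepB need (last, best) ((P.length : Int), g)
          = (last.insert g ((P.length : Int)),
             bupd best (((P.length : Int) - ((lastOcc (P ++ [g]) g0 : Nat) : Int),
                         ((lastOcc (P ++ [g]) g0 : Nat) : Int)))) := by
        simp only [stepB, hv, Option.getD_some, hveq]
        rw [if_pos hcondB]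
        cases best <;> rfl
      rw [hstepB, hsh.1, hlen']
      have hres' : (res ++ [[((lastOcc (P ++ [g]) g0 : Nat) : Int) + 1, (((P ++ [g]).length : Nat) : Int)]]).foldl bstepA none
          = (bupd best (((P.length : Int) - ((lastOcc (P ++ [g]) g0 : Nat) : Int),
                         ((lastOcc (P ++ [g]) g0 : Nat) : Int)))).map keyToPair := by
        rw [List.foldl_append, List.foldl_cons, List.foldl_nil, hres]
        have hc : [((lastOcc (P ++ [g]) g0 : Nat) : Int) + 1, (((P ++ [g]).length : Nat) : Int)]
            = keyToPair (((P.length : Int) - ((lastOcc (P ++ [g]) g0 : Nat) : Int),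
                          ((lastOcc (P ++ [g]) g0 : Nat) : Int))) := by
          simp only [keyToPair]
          have he : (↑P.length : Int) - ↑(lastOcc (P ++ [g]) g0) + ↑(lastOcc (P ++ [g]) g0) + 1
              = (((P ++ [g]).length : Nat) : Int) := by
            push_cast [List.length_append, List.length_singleton]; ring
          rw [he]
        rw [hc, bstepA_keyToPair]
      exact ih (P ++ [g]) (lastOcc (P ++ [g]) g0) _ _ _ _ hgem'
        ⟨hsh.2.2.trans h1', hsh.2.2 ▸ h2', fun g' => hsh.2.2 ▸ h3' g',
         ⟨Nat.le_of_lt hmlt, hminP⟩, hsh.2.1, h6'⟩ hres'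
    · rw [if_neg hcond]
      have hstepB : stepB need (last, best) ((P.length : Int), g)
          = (last.insert g ((P.length : Int)), best) := by
        simp only [stepB]
        rw [if_neg (by rw [← hsz]; exact hcond)]
      rw [hstepB, hlen']
      exact ih (P ++ [g]) L _ _ res best hgem' ⟨h1', h2', h3', ⟨h4a', h4b'⟩, h5', h6'⟩ hres

lemma final_eq (gems : List String) : solution gems = solution_alt gems := by
  have hinv : WInv [] 0 PySem.Dict.empty PySem.Dict.empty :=
    ⟨rfl, List.nodup_nil, fun g => Iff.rfl,
     ⟨Nat.zero_le _, fun g hg => absurd hg (by simp)⟩,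
     fun g => rfl, fun g hg => absurd hg (by simp)⟩
  have hmain := loop_inv gems (PySem.Set.ofList gems).length gems [] 0
    PySem.Dict.empty PySem.Dict.empty [] none rfl hinv rfl
  simp only [List.length_nil, Nat.cast_zero] at hmain
  simp only [solution, solution_alt]
  have hsort : (PySem.List.sorted2
      (loopA gems (PySem.Set.ofList gems).length gems 0 0 PySem.Dict.empty [])
      (fun x => PySem.List.pyGetD x 1 0 - PySem.List.pyGetD x 0 0)
      (fun x => PySem.List.pyGetD x 0 0)).head?
      = (loopA gems (PySem.Set.ofList gems).length gems 0 0 PySem.Dict.empty []).foldl bstepA none := by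
    rw [show (PySem.List.sorted2
        (loopA gems (PySem.Set.ofList gems).length gems 0 0 PySem.Dict.empty [])
        (fun x => PySem.List.pyGetD x 1 0 - PySem.List.pyGetD x 0 0)
        (fun x => PySem.List.pyGetD x 0 0))
      = (loopA gems (PySem.Set.ofList gems).length gems 0 0 PySem.Dict.empty []).foldl
          (fun a x => PySem.List.insertBy
            (fun a b =>
              decide (PySem.List.pyGetD a 1 0 - PySem.List.pyGetD a 0 0 <
                      PySem.List.pyGetD b 1 0 - PySem.List.pyGetD b 0 0) ||
              (!decide (PySem.List.pyGetD b 1 0 - PySem.List.pyGetD b 0 0 <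
                        PySem.List.pyGetD a 1 0 - PySem.List.pyGetD a 0 0) &&
               decide (PySem.List.pyGetD a 0 0 < PySem.List.pyGetD b 0 0))) x a) []
      from rfl]
    exact head_foldl_insertBy _ []
  rw [hmain] at hsort
  have hL : PySem.List.pyGetD (PySem.List.sorted2
      (loopA gems (PySem.Set.ofList gems).length gems 0 0 PySem.Dict.empty [])
      (fun x => PySem.List.pyGetD x 1 0 - PySem.List.pyGetD x 0 0)
      (fun x => PySem.List.pyGetD x 0 0)) 0 []
      = ((PySem.List.sorted2
      (loopA gems (PySem.Set.ofList gems).length gems 0 0 PySem.Dict.empty [])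
      (fun x => PySem.List.pyGetD x 1 0 - PySem.List.pyGetD x 0 0)
      (fun x => PySem.List.pyGetD x 0 0)).head?).getD [] := by
    cases PySem.List.sorted2
      (loopA gems (PySem.Set.ofList gems).length gems 0 0 PySem.Dict.empty [])
      (fun x => PySem.List.pyGetD x 1 0 - PySem.List.pyGetD x 0 0)
      (fun x => PySem.List.pyGetD x 0 0) with
    | nil => rfl
    | cons a t => rw [PySem.List.pyGetD_zero_cons]; rfl
  rw [hL, hsort]
  cases ((PySem.List.enumerate gems 0).foldl
      (stepB (PySem.Set.ofList gems).length) (PySem.Dict.empty, none)).2 <;> rfl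

-- ===== VERDICT (by name: the statement is the Claim_ definition above) =====
theorem solution_spec : Claim_equal_solution := by
  intro gems _ _
  unfold Spec_solution
  exact final_eq gems
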